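-- pv_equiv track=rewrite | github.com/rvandoren/smt_options_finding | compare_options.py | compare_options
-- ===== SOURCE A (Python) =====
-- def compare_options(reference_options, file_options):
--     differences = {}
--     for option in reference_options:
--         if option not in file_options:
--             differences[option] = ("missing", reference_options[option])
--         elif file_options[option] != reference_options[option]:
--             differences[option] = ("different", reference_options[option], file_options[option])
--     for option in file_options:
--         if option not in reference_options:
--             differences[option] = ("extra", file_options[option])
--
--     return differences
-- ===== SOURCE B (Python) =====
-- def compare_options(reference_options, file_options):
--     # Outer-join the two dicts into key -> (ref_value_or_None, file_value_or_None),
--     # then classify each joined pair in a single pass.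
--     merged = {k: (v, None) for k, v in reference_options.items()}
--     for k, v in file_options.items():
--         r, _ = merged.get(k, (None, None))
--         merged[k] = (r, v)
--     differences = {}
--     for k, (r, f) in merged.items():
--         if r is None:
--             differences[k] = ("extra", f)
--         elif f is None:
--             differences[k] = ("missing", r)
--         elif r != f:
--             differences[k] = ("different", r, f)
--     return differences
-- ===== Notes on version B (the rewrite author's own statement) =====
-- stated objective: alternative
-- what changed: Instead of A's two guarded loops that write directly into the result dict, B first outer-joins the two dicts into one key -> (ref_value_or_None, file_value_or_None) table and then classifies each joined pair (extra/missing/different) in a single pass over that table.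
import Mathlib
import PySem

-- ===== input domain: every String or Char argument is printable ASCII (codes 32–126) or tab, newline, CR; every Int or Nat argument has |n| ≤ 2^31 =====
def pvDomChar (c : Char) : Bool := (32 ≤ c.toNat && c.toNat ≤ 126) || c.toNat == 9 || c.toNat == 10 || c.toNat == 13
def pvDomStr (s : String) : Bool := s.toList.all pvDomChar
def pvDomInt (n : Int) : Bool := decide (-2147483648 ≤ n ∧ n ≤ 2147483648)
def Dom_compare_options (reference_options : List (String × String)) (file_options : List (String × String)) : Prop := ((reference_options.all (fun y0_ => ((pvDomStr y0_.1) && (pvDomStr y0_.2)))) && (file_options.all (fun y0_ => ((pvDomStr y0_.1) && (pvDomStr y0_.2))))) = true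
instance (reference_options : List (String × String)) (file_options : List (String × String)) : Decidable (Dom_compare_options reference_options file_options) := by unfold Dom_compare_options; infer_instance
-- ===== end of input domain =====

-- B outer-joins the two dicts into one key -> (Option ref, Option file) table, then classifies each joined pair in a single pass, instead of A's two guarded loops; objective: alternative, same cost.


-- ===== PORT A =====
def compare_options (reference_options : List (String × String)) (file_options : List (String × String)) : List (String × List String) :=
  let refD := PySem.Dict.ofList reference_options
  let fileD := PySem.Dict.ofList file_options
  let differences : PySem.Dict String (List String) :=
    refD.keys.foldl (fun d option =>
      if fileD.contains option = false then
        d.insert option ["missing", refD.getD option ""]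
      else if fileD.getD option "" ≠ refD.getD option "" then
        d.insert option ["different", refD.getD option "", fileD.getD option ""]
      else d) PySem.Dict.empty
  let differences :=
    fileD.keys.foldl (fun d option =>
      if refD.contains option = false then
        d.insert option ["extra", fileD.getD option ""]
      else d) differences
  differences.items

-- ===== PORT B =====
def compare_options_alt (reference_options : List (String × String)) (file_options : List (String × String)) : List (String × List String) :=
  let refD := PySem.Dict.ofList reference_options
  let fileD := PySem.Dict.ofList file_options
  -- merged = {k: (v, None) for k, v in reference_options.items()}
  let merged : PySem.Dict String (Option String × Option String) :=
    PySem.Dict.ofList (refD.items.map (fun p => (p.1, (some p.2, (none : Option String)))))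
  -- for k, v in file_options.items(): r, _ = merged.get(k, (None, None)); merged[k] = (r, v)
  let merged := fileD.items.foldl
    (fun m p => m.insert p.1 ((m.getD p.1 (none, none)).1, some p.2)) merged
  -- single classification pass over the joined table (the (None, None) shape never occurs in merged)
  let differences : PySem.Dict String (List String) :=
    merged.items.foldl (fun d q =>
      match q.2 with
      | (none, some f) => d.insert q.1 ["extra", f]
      | (some r, none) => d.insert q.1 ["missing", r]
      | (some r, some f) => if r ≠ f then d.insert q.1 ["different", r, f] else d
      | (none, none) => d) PySem.Dict.empty
  differences.items

-- ===== PRECONDITION & SPEC =====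
def Spec_compare_options (reference_options : List (String × String)) (file_options : List (String × String)) (out : List (String × List String)) : Prop := out = compare_options_alt reference_options file_options
instance (reference_options : List (String × String)) (file_options : List (String × String)) (out : List (String × List String)) : Decidable (Spec_compare_options reference_options file_options out) := by unfold Spec_compare_options; infer_instance

-- ===== CLAIM (what is proved, stated in full; the proofs are below) =====
def Claim_equal_compare_options : Prop := ∀ (reference_options : List (String × String)) (file_options : List (String × String)), Dom_compare_options reference_options file_options → Spec_compare_options reference_options file_options (compare_options reference_options file_options)

-- ===== LEMMAS AND PROOFS =====

-- the classification A performs for a key present in the reference dict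
def pvClassify (fileD : PySem.Dict String String) (key ref_val : String) : Option (List String) :=
  match fileD.get? key with
  | none => some ["missing", ref_val]
  | some file_val => if file_val ≠ ref_val then some ["different", ref_val, file_val] else none

-- common normal form both ports are reduced to
def pvCanon (reference_options : List (String × String)) (file_options : List (String × String)) : List (String × List String) :=
  let refD := PySem.Dict.ofList reference_options
  let fileD := PySem.Dict.ofList file_options
  refD.keys.filterMap (fun k => (pvClassify fileD k (refD.getD k "")).map (fun e => (k, e)))
    ++ (fileD.keys.filter (fun k => !refD.contains k)).map (fun k => (k, ["extra", fileD.getD k ""]))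

-- a guarded-insert loop over distinct fresh keys appends its selected entries
lemma pv_foldl_insert_opt (g : String → Option (List String)) :
    ∀ (l : List String) (d : PySem.Dict String (List String)), l.Nodup →
      (∀ k ∈ l, (g k).isSome → d.contains k = false) →
      (l.foldl (fun d k => match g k with | some e => d.insert k e | none => d) d).items
        = d.items ++ l.filterMap (fun k => (g k).map (fun e => (k, e)))
  | [], d, _, _ => by simp
  | k :: t, d, hnd, hfresh => by
    rcases List.nodup_cons.mp hnd with ⟨hk, hndt⟩
    cases hg : g k with
    | none =>
      simp only [List.foldl_cons, List.filterMap_cons, hg, Option.map_none]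
      exact pv_foldl_insert_opt g t d hndt (fun k' hk' hs => hfresh k' (List.mem_cons_of_mem _ hk') hs)
    | some e =>
      have hc : d.contains k = false := hfresh k (List.mem_cons_self) (by simp [hg])
      have hfresh' : ∀ k' ∈ t, (g k').isSome → (d.insert k e).contains k' = false := by
        intro k' hk' hs
        rw [PySem.Dict.contains_insert]
        have : k' ≠ k := fun h => hk (h ▸ hk')
        simp [this, hfresh k' (List.mem_cons_of_mem _ hk') hs]
      simp only [List.foldl_cons, List.filterMap_cons, hg, Option.map_some]
      rw [pv_foldl_insert_opt g t (d.insert k e) hndt hfresh',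
        PySem.Dict.items_insert_of_not_contains _ _ hc, List.append_assoc]
      rfl

lemma pv_filterMap_if (p : String → Bool) (f : String → String × List String) :
    ∀ l : List String,
      l.filterMap (fun k => if p k then some (f k) else none) = (l.filter p).map f
  | [] => rfl
  | k :: t => by
    by_cases h : p k <;> simp [h, pv_filterMap_if p f t]

lemma pv_map_fst_filterMap (g : String → Option (List String)) :
    ∀ l : List String,
      (l.filterMap (fun k => (g k).map (fun e => (k, e)))).map Prod.fst
        = l.filter (fun k => (g k).isSome)
  | [] => rfl
  | k :: t => by
    cases hg : g k <;>
      simp [hg, pv_map_fst_filterMap g t]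

-- A's two loops produce the canonical list
lemma pv_A_eq_canon (reference_options file_options : List (String × String)) :
    compare_options reference_options file_options = pvCanon reference_options file_options := by
  unfold compare_options pvCanon
  simp only []
  set refD := PySem.Dict.ofList reference_options with hrefD
  set fileD := PySem.Dict.ofList file_options with hfileD
  have hndr : refD.keys.Nodup := PySem.Dict.nodup_keys_ofList _
  have hndf : fileD.keys.Nodup := PySem.Dict.nodup_keys_ofList _
  set gA : String → Option (List String) := fun k => pvClassify fileD k (refD.getD k "") with hgA
  set g2 : String → Option (List String) :=
    fun k => if refD.contains k = true then none else some ["extra", fileD.getD k ""] with hg2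
  have hstep1 : ∀ (d : PySem.Dict String (List String)) (k : String), k ∈ refD.keys →
      (if fileD.contains k = false then d.insert k ["missing", refD.getD k ""]
       else if fileD.getD k "" ≠ refD.getD k "" then
         d.insert k ["different", refD.getD k "", fileD.getD k ""]
       else d)
      = (match gA k with | some e => d.insert k e | none => d) := by
    intro d k _
    rw [hgA]
    unfold pvClassify
    cases hfd : fileD.get? k with
    | none => simp [PySem.Dict.contains_eq_isSome_get?, hfd]
    | some fv =>
      rw [PySem.Dict.getD_of_get?_eq_some _ _ hfd]
      by_cases hne : fv ≠ refD.getD k "" <;>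
        simp [PySem.Dict.contains_eq_isSome_get?, hfd, hne]
  have hstep2 : ∀ (d : PySem.Dict String (List String)) (k : String), k ∈ fileD.keys →
      (if refD.contains k = false then d.insert k ["extra", fileD.getD k ""] else d)
      = (match g2 k with | some e => d.insert k e | none => d) := by
    intro d k _
    rw [hg2]
    cases hc : refD.contains k <;> simp [hc]
  set FA : String → Option (String × List String) := fun k => (gA k).map (fun e => (k, e)) with hFA
  rw [PySem.List.foldl_congr_mem refD.keys _
        (fun d k => match gA k with | some e => d.insert k e | none => d) PySem.Dict.empty
        (fun acc x hx => hstep1 acc x hx)]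
  have hd1 : (refD.keys.foldl
      (fun d k => match gA k with | some e => d.insert k e | none => d)
      PySem.Dict.empty).items = refD.keys.filterMap FA := by
    rw [pv_foldl_insert_opt gA refD.keys PySem.Dict.empty hndr
      (fun k _ _ => PySem.Dict.contains_empty k)]
    simp [hFA, show (PySem.Dict.empty : PySem.Dict String (List String)).items = [] from rfl]
  set d1 := refD.keys.foldl
      (fun d k => match gA k with | some e => d.insert k e | none => d) PySem.Dict.empty with hd1def
  have hd1keys : d1.keys = refD.keys.filter (fun k => (gA k).isSome) := by
    simp only [PySem.Dict.keys, hd1, hFA]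
    exact pv_map_fst_filterMap gA refD.keys
  rw [PySem.List.foldl_congr_mem fileD.keys _
        (fun d k => match g2 k with | some e => d.insert k e | none => d) d1
        (fun acc x hx => hstep2 acc x hx)]
  have hfresh2 : ∀ k ∈ fileD.keys, (g2 k).isSome → d1.contains k = false := by
    intro k _ hs
    have hrc : refD.contains k = false := by
      by_contra hcc
      have hct : refD.contains k = true := by simpa using hcc
      simp [hg2, hct] at hs
    by_contra h
    have hct : d1.contains k = true := by simpa using h
    have hmem := (PySem.Dict.contains_iff_mem_keys _ _).mp hct
    rw [hd1keys] at hmem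
    have hkr := (List.mem_filter.mp hmem).1
    rw [(PySem.Dict.contains_iff_mem_keys _ _).mpr hkr] at hrc
    exact absurd hrc (by decide)
  rw [pv_foldl_insert_opt g2 fileD.keys d1 hndf hfresh2, hd1]
  congr 1
  rw [show fileD.keys.filterMap (fun k => (g2 k).map (fun e => (k, e)))
        = fileD.keys.filterMap (fun k => if !refD.contains k then
            some (k, ["extra", fileD.getD k ""]) else none) from
      List.filterMap_congr (fun k _ => by
        rw [hg2]; cases h : refD.contains k <;> simp [h])]
  exact pv_filterMap_if (fun k => !refD.contains k) (fun k => (k, ["extra", fileD.getD k ""])) fileD.keys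

-- the merge step of B
def pvMergeStep (m : PySem.Dict String (Option String × Option String)) (p : String × String) :
    PySem.Dict String (Option String × Option String) :=
  m.insert p.1 ((m.getD p.1 (none, none)).1, some p.2)

lemma pv_merge_get_not_mem (l : List (String × String)) (k : String)
    (hk : k ∉ l.map Prod.fst) (m : PySem.Dict String (Option String × Option String)) :
    (l.foldl pvMergeStep m).get? k = m.get? k := by
  induction l generalizing m with
  | nil => rfl
  | cons p t ih =>
    have hne : k ≠ p.1 := by
      intro h; exact hk (by simp [h])
    have hkt : k ∉ t.map Prod.fst := fun h => hk (by simp [h])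
    rw [List.foldl_cons, ih hkt]
    exact PySem.Dict.get?_insert_of_ne _ _ hne

lemma pv_merge_get_mem (l : List (String × String)) (hl : (l.map Prod.fst).Nodup)
    (k : String) (v : String) (hkv : (k, v) ∈ l)
    (m : PySem.Dict String (Option String × Option String)) :
    (l.foldl pvMergeStep m).get? k = some ((m.getD k (none, none)).1, some v) := by
  induction l generalizing m with
  | nil => cases hkv
  | cons p t ih =>
    rw [List.map_cons, List.nodup_cons] at hl
    rcases hl with ⟨hp, hndt⟩
    by_cases hk : k = p.1
    · have hv : v = p.2 := by
        rcases List.mem_cons.mp hkv with h | h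
        · exact congrArg Prod.snd h
        · rw [hk] at h; exact absurd (List.mem_map_of_mem (f := Prod.fst) h) hp
      subst hv; subst hk
      rw [List.foldl_cons, pv_merge_get_not_mem t p.1 hp]
      unfold pvMergeStep
      rw [PySem.Dict.get?_insert_self]
    · have hkt : (k, v) ∈ t := by
        rcases List.mem_cons.mp hkv with h | h
        · exact absurd (congrArg Prod.fst h) hk
        · exact h
      rw [List.foldl_cons, ih hndt hkt]
      unfold pvMergeStep
      rw [PySem.Dict.getD_eq_get?_getD, PySem.Dict.get?_insert_of_ne _ _ hk,
        ← PySem.Dict.getD_eq_get?_getD]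

-- B's joined table and single pass produce the canonical list
lemma pv_B_eq_canon (reference_options file_options : List (String × String)) :
    compare_options_alt reference_options file_options = pvCanon reference_options file_options := by
  unfold compare_options_alt pvCanon
  simp only []
  set refD := PySem.Dict.ofList reference_options with hrefD
  set fileD := PySem.Dict.ofList file_options with hfileD
  have hndr : refD.keys.Nodup := PySem.Dict.nodup_keys_ofList _
  have hndf : fileD.keys.Nodup := PySem.Dict.nodup_keys_ofList _
  set base := refD.items.map (fun p => (p.1, (some p.2, (none : Option String)))) with hbase
  have hbasefst : base.map Prod.fst = refD.keys := by
    rw [hbase, List.map_map]; rfl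
  set m0 := PySem.Dict.ofList base with hm0
  have hm0items : m0.items = base := by
    rw [hm0, show PySem.Dict.ofList base
          = List.foldl (fun (d : PySem.Dict String (Option String × Option String))
              (a : String × (Option String × Option String)) => d.insert a.1 a.2)
            PySem.Dict.empty base from rfl]
    rw [PySem.Dict.items_foldl_insert_fresh _ Prod.fst Prod.snd PySem.Dict.empty
          (fun a _ => PySem.Dict.contains_empty a.1) (by rw [hbasefst]; exact hndr)]
    simp [show (PySem.Dict.empty : PySem.Dict String (Option String × Option String)).items = [] from rfl]
  have hm0keys : m0.keys = refD.keys := by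
    simp only [PySem.Dict.keys, hm0items, hbasefst]
  have hm0get : ∀ k ∈ refD.keys, m0.get? k = some (some (refD.getD k ""), none) := by
    intro k hk
    have hkv : (k, refD.getD k "") ∈ refD.items := by
      rw [PySem.Dict.items_eq_map_keys refD hndr ""]
      exact List.mem_map_of_mem hk
    have : (k, (some (refD.getD k ""), (none : Option String))) ∈ base :=
      List.mem_map_of_mem (f := fun p => (p.1, (some p.2, (none : Option String)))) hkv
    have hmem : (k, (some (refD.getD k ""), (none : Option String))) ∈ m0.items := by
      rw [hm0items]; exact this
    exact PySem.Dict.get?_of_mem_items m0 hmem (by rw [hm0keys]; exact hndr)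
  have hm0get_none : ∀ k, k ∉ refD.keys → m0.get? k = none := by
    intro k hk
    exact (PySem.Dict.get?_eq_none_iff_not_mem_keys m0 k).mpr (by rw [hm0keys]; exact hk)
  have hfilefst : fileD.items.map Prod.fst = fileD.keys := rfl
  set merged := fileD.items.foldl
    (fun m p => m.insert p.1 ((m.getD p.1 (none, none)).1, some p.2)) m0 with hmerged
  have hmergedPv : merged = fileD.items.foldl pvMergeStep m0 := rfl
  -- lookups in merged
  have hget_ref : ∀ k ∈ refD.keys, merged.get? k = some (some (refD.getD k ""), fileD.get? k) := by
    intro k hk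
    by_cases hkf : k ∈ fileD.keys
    · have hkv : (k, fileD.getD k "") ∈ fileD.items := by
        rw [PySem.Dict.items_eq_map_keys fileD hndf ""]
        exact List.mem_map_of_mem hkf
      rw [hmergedPv, pv_merge_get_mem fileD.items (hfilefst ▸ hndf) k _ hkv m0,
        PySem.Dict.getD_eq_get?_getD, hm0get k hk]
      have : fileD.get? k = some (fileD.getD k "") := by
        cases hgf : fileD.get? k with
        | none =>
          exact absurd ((PySem.Dict.contains_iff_mem_keys _ _).mpr hkf)
            (by rw [PySem.Dict.contains_eq_isSome_get?, hgf]; decide)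
        | some v => rw [PySem.Dict.getD_of_get?_eq_some _ _ hgf]
      rw [this]
      rfl
    · rw [hmergedPv, pv_merge_get_not_mem fileD.items k (hfilefst ▸ hkf) m0, hm0get k hk]
      have : fileD.get? k = none := (PySem.Dict.get?_eq_none_iff_not_mem_keys fileD k).mpr hkf
      rw [this]
  have hget_extra : ∀ k ∈ fileD.keys, k ∉ refD.keys →
      merged.get? k = some (none, some (fileD.getD k "")) := by
    intro k hkf hkr
    have hkv : (k, fileD.getD k "") ∈ fileD.items := by
      rw [PySem.Dict.items_eq_map_keys fileD hndf ""]
      exact List.mem_map_of_mem hkf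
    rw [hmergedPv, pv_merge_get_mem fileD.items (hfilefst ▸ hndf) k _ hkv m0,
      PySem.Dict.getD_eq_get?_getD, hm0get_none k hkr]
    rfl
  -- keys of merged
  have hmkeys : merged.keys = refD.keys ++ fileD.keys.filter (fun k => !refD.contains k) := by
    rw [hmerged]
    rw [PySem.Dict.keys_foldl_insert_key fileD.items Prod.fst _ m0, hm0keys, hfilefst]
    rw [PySem.Set.update_eq_append_filter, PySem.Set.ofList_eq_self_of_nodup _ hndf]
    congr 1
    apply List.filter_congr
    intro k _
    rw [PySem.Set.contains_eq_listContains, PySem.Dict.contains_eq_decide_mem_keys]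
    congr 1
    simp
  have hmnodup : merged.keys.Nodup := by
    rw [hmerged]
    exact PySem.Dict.nodup_keys_foldl_insert_key fileD.items Prod.fst _ m0 (by rw [hm0keys]; exact hndr)
  -- classify from merged's stored pair
  set gB : String → Option (List String) := fun k =>
    match merged.getD k (none, none) with
    | (none, some f) => some ["extra", f]
    | (some r, none) => some ["missing", r]
    | (some r, some f) => if r ≠ f then some ["different", r, f] else none
    | (none, none) => none with hgB
  have hstep : ∀ (d : PySem.Dict String (List String)) (q : String × (Option String × Option String)),
      q ∈ merged.items →
      (match q.2 with
       | (none, some f) => d.insert q.1 ["extra", f]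
       | (some r, none) => d.insert q.1 ["missing", r]
       | (some r, some f) => if r ≠ f then d.insert q.1 ["different", r, f] else d
       | (none, none) => d)
      = (match gB q.1 with | some e => d.insert q.1 e | none => d) := by
    intro d q hq
    rcases q with ⟨k, r, f⟩
    have : merged.getD k (none, none) = (r, f) := PySem.Dict.getD_of_mem_items merged hq hmnodup (none, none)
    rw [hgB]
    simp only [this]
    cases r with
    | none => cases f <;> rfl
    | some rv =>
      cases f with
      | none => rfl
      | some fv => by_cases h : rv ≠ fv <;> simp [h]
  rw [PySem.List.foldl_congr_mem merged.items _
        (fun d q => match gB q.1 with | some e => d.insert q.1 e | none => d) PySem.Dict.empty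
        (fun acc x hx => hstep acc x hx)]
  rw [PySem.Dict.items_eq_map_keys merged hmnodup (none, none), List.foldl_map]
  rw [pv_foldl_insert_opt gB merged.keys PySem.Dict.empty hmnodup
      (fun k _ _ => PySem.Dict.contains_empty k)]
  rw [show (PySem.Dict.empty : PySem.Dict String (List String)).items = [] from rfl,
    List.nil_append, hmkeys, List.filterMap_append]
  congr 1
  · apply List.filterMap_congr
    intro k hk
    rw [hgB]
    simp only [PySem.Dict.getD_eq_get?_getD, hget_ref k hk]
    unfold pvClassify
    cases hgf : fileD.get? k with
    | none => rfl
    | some fv =>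
      simp only [Option.getD_some]
      by_cases h : (refD.get? k).getD "" = fv
      · rw [if_neg (fun hc => hc h), if_neg (fun hc => hc h.symm)]
      · rw [if_pos h, if_pos (fun hc => h hc.symm)]
  · rw [show (fileD.keys.filter (fun k => !refD.contains k)).filterMap
          (fun k => (gB k).map (fun e => (k, e)))
        = (fileD.keys.filter (fun k => !refD.contains k)).filterMap
          (fun k => some (k, ["extra", fileD.getD k ""])) from
      List.filterMap_congr (fun k hk => by
        have hkf := (List.mem_filter.mp hk).1
        have hkr : k ∉ refD.keys := by
          have := (List.mem_filter.mp hk).2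
          intro hmem
          rw [(PySem.Dict.contains_iff_mem_keys _ _).mpr hmem] at this
          exact absurd this (by decide)
        rw [hgB]
        simp only [PySem.Dict.getD_eq_get?_getD, hget_extra k hkf hkr]
        rfl)]
    simp

-- ===== VERDICT (by name: the statement is the Claim_ definition above) =====
theorem compare_options_spec : Claim_equal_compare_options := by
  intro reference_options file_options _
  unfold Spec_compare_options
  rw [pv_A_eq_canon, pv_B_eq_canon]
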